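-- pv_equiv track=rewrite | github.com/michael-wojtas/Szyfrowanie | plotkowe.py | deszyfr
-- ===== SOURCE A (Python) =====
-- def deszyfr(ods):
--     n = len(ods)
--     oryginal = [""] * n
--
--     j = 0
--
--     for i in range(0, n, 4):
--         oryginal[i] = ods[j]
--         j += 1
--
--     for i in range(1, n, 2):
--         oryginal[i] = ods[j]
--         j += 1
--
--     for i in range(2, n, 4):
--         oryginal[i] = ods[j]
--         j += 1
--
--     return "".join(oryginal)
-- ===== SOURCE B (Python) =====
-- def deszyfr(ods):
--     n = len(ods)
--     a = (n + 3) // 4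
--     b = n // 2
--
--     def pos(i):
--         r = i % 4
--         if r == 0:
--             return i // 4
--         if r == 2:
--             return a + b + (i - 2) // 4
--         return a + (i - 1) // 2
--
--     return "".join(ods[pos(i)] for i in range(n))
-- ===== Notes on version B (the rewrite author's own statement) =====
-- stated objective: alternative
-- what changed: B computes each output character's source index by closed-form arithmetic on the output position (case on i mod 4, with the two segment-length offsets (n+3)//4 and n//2), gathering in one pass with O(1) extra space, instead of A's three scatter loops threading a running source counter into a mutable buffer.
import Mathlib
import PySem

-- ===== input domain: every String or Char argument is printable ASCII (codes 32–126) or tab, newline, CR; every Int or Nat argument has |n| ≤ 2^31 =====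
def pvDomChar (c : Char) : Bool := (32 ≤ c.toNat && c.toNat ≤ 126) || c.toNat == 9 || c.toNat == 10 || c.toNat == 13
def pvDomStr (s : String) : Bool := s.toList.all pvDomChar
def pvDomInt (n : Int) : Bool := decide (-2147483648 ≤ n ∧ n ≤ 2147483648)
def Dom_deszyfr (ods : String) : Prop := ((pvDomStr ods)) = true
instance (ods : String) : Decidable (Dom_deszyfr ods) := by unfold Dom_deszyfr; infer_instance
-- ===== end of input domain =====

-- B replaces A's three scatter loops (which thread a running source counter into a mutable
-- buffer) by a one-pass gather that computes each output position's source index in closed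
-- form from i mod 4 plus the two segment lengths; same O(n) cost, O(1) extra space.

-- ===== PORT A =====
-- In Python every write index i and read index j stays in range (the three ranges partition
-- 0..n-1 and j runs 0..n-1), so the total pySetD/pyGetD forms are exact here.
-- the loop body shared by A's three loops: oryginal[i] = ods[j]; j += 1
def pvStepA (cs : List Char) (st : List String × Int) (i : Int) : List String × Int :=
  (PySem.List.pySetD st.1 i (String.ofList [PySem.List.pyGetD cs st.2 ' ']), st.2 + 1)

def deszyfr (ods : String) : String :=
  let n : Int := PySem.Str.len ods
  let cs : List Char := ods.toList
  let st0 : List String × Int := (List.replicate n.toNat "", 0)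
  let st1 := (PySem.List.pyRange 0 n 4).foldl (pvStepA cs) st0
  let st2 := (PySem.List.pyRange 1 n 2).foldl (pvStepA cs) st1
  let st3 := (PySem.List.pyRange 2 n 4).foldl (pvStepA cs) st2
  PySem.Str.join "" st3.1

-- ===== PORT B =====
-- Source B's helper pos(i): the closed-form source index for output position i
def pvPosB (a b : Int) (i : Int) : Int :=
  let r := PySem.Int.mod i 4
  if r = 0 then PySem.Int.floordiv i 4
  else if r = 2 then a + b + PySem.Int.floordiv (i - 2) 4
  else a + PySem.Int.floordiv (i - 1) 2

def deszyfr_alt (ods : String) : String :=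
  let n : Int := PySem.Str.len ods
  let cs : List Char := ods.toList
  let a : Int := PySem.Int.floordiv (n + 3) 4
  let b : Int := PySem.Int.floordiv n 2
  String.ofList ((PySem.List.pyRange 0 n 1).map
      (fun i => PySem.List.pyGetD cs (pvPosB a b i) ' '))

-- ===== PRECONDITION & SPEC =====
def Spec_deszyfr (ods : String) (out : String) : Prop := out = deszyfr_alt ods
instance (ods : String) (out : String) : Decidable (Spec_deszyfr ods out) := by unfold Spec_deszyfr; infer_instance

-- ===== CLAIM (what is proved, stated in full; the proofs are below) =====
def Claim_equal_deszyfr : Prop := ∀ (ods : String), Dom_deszyfr ods → Spec_deszyfr ods (deszyfr ods)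

-- ===== LEMMAS AND PROOFS =====

-- the read-order permutation A walks
def pvRo (n : Int) : List Int :=
  PySem.List.pyRange 0 n 4 ++ PySem.List.pyRange 1 n 2 ++ PySem.List.pyRange 2 n 4

-- the value A writes at source index j
def pvGA (cs : List Char) (j : Int) : String := String.ofList [PySem.List.pyGetD cs j ' ']

-- Nat forms of B's segment lengths and source index
def pvA1 (n : Nat) : Nat := (n + 3) / 4
def pvA2 (n : Nat) : Nat := n / 2
def pvIdx (n k : Nat) : Nat :=
  if k % 4 = 0 then k / 4
  else if k % 4 = 2 then pvA1 n + pvA2 n + (k - 2) / 4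
  else pvA1 n + (k - 1) / 2

-- a j-threading write fold is the fold over the enumerated index list
theorem pv_foldl_write_enum {α : Type} (g : Int → α) (l : List Int) (acc : List α) (j0 : Int) :
    l.foldl (fun st i => (PySem.List.pySetD st.1 i (g st.2), st.2 + 1)) (acc, j0)
      = ((PySem.List.enumerate l j0).foldl
          (fun a p => PySem.List.pySetD a p.2 (g p.1)) acc, j0 + l.length) := by
  induction l generalizing acc j0 with
  | nil => simp [PySem.List.enumerate]
  | cons i t ih =>
      simp only [List.foldl_cons, PySem.List.enumerate, List.length_cons]
      rw [ih]
      simp only [Prod.mk.injEq]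
      exact ⟨trivial, by push_cast; omega⟩

theorem pv_foldl_stepA (cs : List Char) (l : List Int) (acc : List String) (j0 : Int) :
    l.foldl (pvStepA cs) (acc, j0)
      = ((PySem.List.enumerate l j0).foldl
          (fun a p => PySem.List.pySetD a p.2 (pvGA cs p.1)) acc, j0 + l.length) :=
  pv_foldl_write_enum (pvGA cs) l acc j0

-- A's three loops are ONE enumerated write fold over the concatenated read order
theorem pv_foldl_stepA3 (cs : List Char) (l1 l2 l3 : List Int) (acc : List String) :
    ((l3.foldl (pvStepA cs) ((l2.foldl (pvStepA cs) ((l1.foldl (pvStepA cs) (acc, 0)))))).1)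
      = (PySem.List.enumerate (l1 ++ l2 ++ l3) 0).foldl
          (fun a p => PySem.List.pySetD a p.2 (pvGA cs p.1)) acc := by
  rw [pv_foldl_stepA, pv_foldl_stepA, pv_foldl_stepA,
      PySem.List.enumerate_append, PySem.List.enumerate_append,
      List.foldl_append, List.foldl_append]
  have h3 : (0 : Int) + ↑l1.length + ↑l2.length = 0 + ↑(l1 ++ l2).length := by
    simp [List.length_append]
  rw [h3]

theorem pv_length_writeFold {α : Type} (g : Int → α) (l : List (Int × Int)) (acc : List α) :
    (l.foldl (fun a p => PySem.List.pySetD a p.2 (g p.1)) acc).length = acc.length := by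
  induction l generalizing acc with
  | nil => rfl
  | cons q t ih => simp [ih, PySem.List.length_pySetD]

theorem pv_writeFold_getElem {α : Type} (g : Int → α) (l : List Int) (s : Int) (acc : List α)
    (hnd : l.Nodup) (hmem : ∀ x ∈ l, 0 ≤ x ∧ x < (acc.length : Int)) (k : Nat)
    (hk : k < acc.length) :
    ((PySem.List.enumerate l s).foldl (fun a p => PySem.List.pySetD a p.2 (g p.1)) acc)[k]? =
      (match PySem.List.index? l ((k : Int)) with
       | some p => some (g (s + p))
       | none => acc[k]?) := by
  induction l generalizing s acc with
  | nil =>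
      simp [PySem.List.enumerate, PySem.List.index?_eq_idxOf?, List.idxOf?]
  | cons i t ih =>
      obtain ⟨hi0, hilen⟩ := hmem i (List.mem_cons_self ..)
      have hset : PySem.List.pySetD acc i (g s) = acc.set i.toNat (g s) :=
        PySem.List.pySetD_of_nonneg acc (g s) hi0
      have hlen' : (acc.set i.toNat (g s)).length = acc.length := List.length_set ..
      have hndt : t.Nodup := hnd.of_cons
      have hmemt : ∀ x ∈ t, 0 ≤ x ∧ x < ((acc.set i.toNat (g s)).length : Int) := by
        intro x hx; rw [hlen']; exact hmem x (List.mem_cons_of_mem _ hx)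
      simp only [PySem.List.enumerate, List.foldl_cons, hset]
      rw [ih (s + 1) (acc.set i.toNat (g s)) hndt hmemt (hlen' ▸ hk)]
      by_cases hik : (k : Int) = i
      · have hkt : i.toNat = k := by omega
        have hknot : ((k : Int)) ∉ t := by rw [hik]; exact (List.nodup_cons.mp hnd).1
        rw [← hik, PySem.List.index?_cons_self,
            (PySem.List.index?_eq_none_iff t ((k:Int))).mpr hknot]
        have h1 : ((k : Int)).toNat = k := Int.toNat_natCast k
        rw [h1]
        simp [hk]
      · rw [PySem.List.index?_cons_of_ne t (fun h => hik h.symm)]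
        cases hidx : PySem.List.index? t ((k : Int)) with
        | none =>
            simp only [Option.map_none]
            apply List.getElem?_set_ne
            omega
        | some p =>
            simp only [Option.map_some]
            congr 1
            push_cast
            ring_nf

theorem pv_nodup_pyRange_pos (a b : Int) {s : Int} (hs : 0 < s) :
    (PySem.List.pyRange a b s).Nodup := by
  rw [PySem.List.pyRange_of_pos a b hs]
  refine (List.nodup_range ..).map ?_
  intro x y h
  have : s * (x : Int) = s * (y : Int) := by linarith
  have := mul_left_cancel₀ (ne_of_gt hs) this
  exact_mod_cast this

theorem pv_ro_nodup (n : Int) : (pvRo n).Nodup := by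
  have m1 := fun x => (PySem.List.mem_pyRange_iff_of_pos (a := 0) (b := n) (s := 4) (by norm_num) x)
  have m2 := fun x => (PySem.List.mem_pyRange_iff_of_pos (a := 1) (b := n) (s := 2) (by norm_num) x)
  have m3 := fun x => (PySem.List.mem_pyRange_iff_of_pos (a := 2) (b := n) (s := 4) (by norm_num) x)
  unfold pvRo
  rw [List.nodup_append, List.nodup_append]
  refine ⟨⟨pv_nodup_pyRange_pos _ _ (by norm_num), pv_nodup_pyRange_pos _ _ (by norm_num), ?_⟩,
      pv_nodup_pyRange_pos _ _ (by norm_num), ?_⟩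
  · intro x hx1 y hy2
    have h1 := (m1 x).mp hx1
    have h2 := (m2 y).mp hy2
    omega
  · intro x hx y hy3
    have h3 := (m3 y).mp hy3
    rcases List.mem_append.mp hx with hx1 | hx2
    · have h1 := (m1 x).mp hx1; omega
    · have h2 := (m2 x).mp hx2; omega

theorem pv_ro_mem (n : Int) : ∀ x ∈ pvRo n, 0 ≤ x ∧ x < n := by
  intro x hx
  unfold pvRo at hx
  rcases List.mem_append.mp hx with hx | hx3
  · rcases List.mem_append.mp hx with hx1 | hx2
    · have := (PySem.List.mem_pyRange_iff_of_pos (by norm_num : (0:Int) < 4) x).mp hx1; omega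
    · have := (PySem.List.mem_pyRange_iff_of_pos (by norm_num : (0:Int) < 2) x).mp hx2; omega
  · have := (PySem.List.mem_pyRange_iff_of_pos (by norm_num : (0:Int) < 4) x).mp hx3; omega

-- lengths of the three segments, in Nat form
theorem pv_len_r1 (n : Nat) : (PySem.List.pyRange 0 (n:Int) 4).length = pvA1 n := by
  rw [PySem.List.pyRange_of_pos 0 (n:Int) (by norm_num : (0:Int) < 4), List.length_map,
      List.length_range]
  unfold pvA1
  split_ifs with h <;> omega

theorem pv_len_r2 (n : Nat) : (PySem.List.pyRange 1 (n:Int) 2).length = pvA2 n := by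
  rw [PySem.List.pyRange_of_pos 1 (n:Int) (by norm_num : (0:Int) < 2), List.length_map,
      List.length_range]
  unfold pvA2
  split_ifs with h <;> omega

theorem pv_len_r3 (n : Nat) : (PySem.List.pyRange 2 (n:Int) 4).length = (n + 1) / 4 := by
  rw [PySem.List.pyRange_of_pos 2 (n:Int) (by norm_num : (0:Int) < 4), List.length_map,
      List.length_range]
  split_ifs with h <;> omega

theorem pv_pyRange_getElem? (a b : Int) {s : Int} (hs : 0 < s) (j : Nat)
    (hj : j < (PySem.List.pyRange a b s).length) :
    (PySem.List.pyRange a b s)[j]? = some (a + s * j) := by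
  rw [PySem.List.pyRange_of_pos a b hs] at hj ⊢
  rw [List.length_map, List.length_range] at hj
  rw [List.getElem?_map, List.getElem?_range hj]
  rfl

-- the element of pvRo at B's closed-form index is exactly the output position k
theorem pv_ro_getElem? (n k : Nat) (hk : k < n) :
    (pvRo (n:Int))[pvIdx n k]? = some ((k:Int)) := by
  have l1 := pv_len_r1 n
  have l2 := pv_len_r2 n
  have l3 := pv_len_r3 n
  unfold pvRo pvIdx
  by_cases h0 : k % 4 = 0
  · rw [if_pos h0]
    have hlt : k / 4 < (PySem.List.pyRange 0 (n:Int) 4).length := by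
      rw [l1]; unfold pvA1; omega
    rw [List.getElem?_append_left (by simp only [List.length_append]; omega),
        List.getElem?_append_left hlt,
        pv_pyRange_getElem? 0 (n:Int) (by norm_num) _ hlt]
    congr 1
    omega
  · by_cases h2 : k % 4 = 2
    · rw [if_neg h0, if_pos h2]
      have hge : (PySem.List.pyRange 0 (n:Int) 4 ++ PySem.List.pyRange 1 (n:Int) 2).length
          ≤ pvA1 n + pvA2 n + (k - 2) / 4 := by
        simp only [List.length_append]; rw [l1, l2]; omega
      rw [List.getElem?_append_right hge]
      have hlt3 : pvA1 n + pvA2 n + (k - 2) / 4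
          - (PySem.List.pyRange 0 (n:Int) 4 ++ PySem.List.pyRange 1 (n:Int) 2).length
          < (PySem.List.pyRange 2 (n:Int) 4).length := by
        simp only [List.length_append]; rw [l1, l2, l3]; unfold pvA1 pvA2; omega
      rw [pv_pyRange_getElem? 2 (n:Int) (by norm_num) _ hlt3]
      congr 1
      simp only [List.length_append]
      rw [l1, l2]
      unfold pvA1 pvA2
      omega
    · -- k is odd
      have hodd : k % 2 = 1 := by omega
      rw [if_neg h0, if_neg h2]
      have hge1 : (PySem.List.pyRange 0 (n:Int) 4).length ≤ pvA1 n + (k - 1) / 2 := by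
        rw [l1]; unfold pvA1; omega
      have hlt2 : pvA1 n + (k - 1) / 2 - (PySem.List.pyRange 0 (n:Int) 4).length
          < (PySem.List.pyRange 1 (n:Int) 2).length := by
        rw [l1, l2]; unfold pvA1 pvA2; omega
      rw [List.getElem?_append_left (by simp only [List.length_append]; omega),
          List.getElem?_append_right hge1,
          pv_pyRange_getElem? 1 (n:Int) (by norm_num) _ hlt2]
      congr 1
      rw [l1]
      unfold pvA1
      omega

theorem pv_ro_idx (n k : Nat) (hk : k < n) :
    ∃ (h : pvIdx n k < (pvRo (n:Int)).length), (pvRo (n:Int))[pvIdx n k] = (k : Int) := by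
  have hq := pv_ro_getElem? n k hk
  have hp : pvIdx n k < (pvRo (n:Int)).length := by
    by_contra h
    rw [List.getElem?_eq_none (by omega)] at hq
    cases hq
  refine ⟨hp, ?_⟩
  rw [List.getElem?_eq_getElem hp] at hq
  exact Option.some.inj hq

-- in a duplicate-free list, the index of l[p] is p
theorem pv_index?_of_nodup {x : Int} (l : List Int) (hnd : l.Nodup) (p : Nat)
    (hp : p < l.length) (hx : l[p] = x) : PySem.List.index? l x = some p := by
  rw [PySem.List.index?_eq_some_iff]
  refine ⟨l.take p, l.drop (p + 1), ?_, List.length_take_of_le (le_of_lt hp), ?_⟩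
  · conv_lhs => rw [← List.take_append_drop p l]
    rw [← List.getElem_cons_drop hp, hx]
  · intro hmem
    obtain ⟨j, hj, hje⟩ := List.mem_iff_getElem.mp hmem
    rw [List.length_take] at hj
    have hjp : j < p := lt_of_lt_of_le hj (min_le_left ..)
    have hjl : j < l.length := lt_trans hjp hp
    rw [List.getElem_take] at hje
    have : j = p := (List.Nodup.getElem_inj_iff hnd).mp (hje.trans hx.symm)
    omega

-- B's Int-valued pos agrees with the Nat-valued pvIdx on 0 ≤ k < n
theorem pv_posB_eq (n k : Nat) (hk : k < n) :
    pvPosB (PySem.Int.floordiv ((n:Int) + 3) 4) (PySem.Int.floordiv (n:Int) 2) (k:Int)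
      = (pvIdx n k : Int) := by
  unfold pvPosB pvIdx pvA1 pvA2
  simp only [PySem.Int.mod_eq_emod_of_pos (by norm_num : (0:Int) < 4),
      PySem.Int.floordiv_eq_ediv_of_pos (by norm_num : (0:Int) < 4),
      PySem.Int.floordiv_eq_ediv_of_pos (by norm_num : (0:Int) < 2)]
  split_ifs <;> omega

theorem pv_main (ods : String) : deszyfr ods = deszyfr_alt ods := by
  unfold deszyfr deszyfr_alt
  simp only [PySem.Str.len_eq, Int.toNat_natCast]
  set cs := ods.toList with hcs
  set n : Nat := cs.length with hn
  have hro : PySem.List.pyRange 0 (↑n) 4 ++ PySem.List.pyRange 1 (↑n) 2 ++ PySem.List.pyRange 2 (↑n) 4 = pvRo ↑n := rfl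
  rw [pv_foldl_stepA3, hro]
  set F := (PySem.List.enumerate (pvRo ↑n) 0).foldl
      (fun a p => PySem.List.pySetD a p.2 (pvGA cs p.1)) (List.replicate n "") with hF
  set aL : Int := PySem.Int.floordiv ((n:Int) + 3) 4 with haL
  set bL : Int := PySem.Int.floordiv (n:Int) 2 with hbL
  set f : Int → Char := fun i => PySem.List.pyGetD cs (pvPosB aL bL i) ' ' with hf
  have hmemF : ∀ x ∈ pvRo (↑n : Int), 0 ≤ x ∧ x < ((List.replicate n ("" : String)).length : Int) := by
    intro x hx
    have := pv_ro_mem (↑n) x hx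
    simp only [List.length_replicate]
    omega
  have hFlen : F.length = n := by
    rw [hF, pv_length_writeFold (pvGA cs), List.length_replicate]
  have key : F = ((PySem.List.pyRange 0 (↑n : Int) 1).map f).map (fun c => String.ofList [c]) := by
    refine List.ext_getElem ?_ ?_
    · simp [hFlen, PySem.List.length_pyRange_one]
    · intro k hk1 hk2
      have hkn : k < n := by rwa [hFlen] at hk1
      obtain ⟨hplt, hpel⟩ := pv_ro_idx n k hkn
      have hp : PySem.List.index? (pvRo (↑n : Int)) (↑k) = some (pvIdx n k) :=
        pv_index?_of_nodup (pvRo ↑n) (pv_ro_nodup _) (pvIdx n k) hplt hpel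
      have hFk : F[k]? = some (pvGA cs ((0:Int) + ↑(pvIdx n k))) := by
        rw [hF, pv_writeFold_getElem (pvGA cs) (pvRo ↑n) 0 (List.replicate n "")
              (pv_ro_nodup _) hmemF k (by simpa using hkn), hp]
      have hfk : f (↑k) = PySem.List.pyGetD cs ((0:Int) + ↑(pvIdx n k)) ' ' := by
        rw [hf]
        simp only [haL, hbL]
        rw [pv_posB_eq n k hkn]
        norm_num
      have hrhs : (((PySem.List.pyRange 0 (↑n : Int) 1).map f).map (fun c => String.ofList [c]))[k]?
          = some (String.ofList [PySem.List.pyGetD cs ((0:Int) + ↑(pvIdx n k)) ' ']) := by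
        rw [List.getElem?_map, PySem.List.getElem?_map_pyRange_zero f n k hkn]
        simp only [Option.map_some, hfk]
      have hsome : (F[k]? : Option String)
          = (((PySem.List.pyRange 0 (↑n : Int) 1).map f).map (fun c => String.ofList [c]))[k]? := by
        rw [hFk, hrhs]
        rfl
      rw [List.getElem?_eq_getElem hk1, List.getElem?_eq_getElem hk2] at hsome
      exact Option.some.inj hsome
  apply String.toList_inj.mp
  rw [PySem.Str.toList_join, key, List.map_map]
  have hcomp : (String.toList ∘ fun c => String.ofList [c]) = fun c : Char => [c] := by
    funext c
    simp
  rw [hcomp]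
  have hjoin := PySem.Chars.join_nil_singletons ((PySem.List.pyRange 0 (↑n : Int) 1).map f)
  simp only [String.toList_empty]
  rw [hjoin, String.toList_ofList]

-- ===== VERDICT (by name: the statement is the Claim_ definition above) =====
theorem deszyfr_spec : Claim_equal_deszyfr := by
  intro ods _
  unfold Spec_deszyfr
  exact pv_main ods
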